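-- pv_equiv track=rewrite | github.com/NicolasMoreauCPage/POC_TESTING_INTEROP | app/routers/messages.py | _extract_ipp_and_dossier
-- ===== SOURCE A (Python) =====
-- def _extract_ipp_and_dossier(payload: str) -> tuple[str, str]:
--     """Extract IPP (from PID-3) and dossier/visit number (from PV1-19) from an HL7 v2 message.
--
--     Returns (ipp, dossier) with empty strings when not found. Be tolerant to CR/LF.
--     """
--     if not isinstance(payload, str):
--         return "", ""
--     lines = payload.replace("\r\n", "\r").replace("\n", "\r").split("\r")
--     ipp = ""
--     dossier = ""
--     for line in lines:
--         if not line: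
--             continue
--         if line.startswith("PID|"):
--             parts = line.split("|")
--             # PID-3 may contain repetitions separated by '~'
--             if len(parts) > 3 and parts[3]:
--                 rep_first = parts[3].split("~")[0]
--                 cx = rep_first.split("^")
--                 cand = cx[0] if cx else ""
--                 id_type = cx[4] if len(cx) > 4 else ""
--                 # Prefer identifiers explicitly typed as PI when present
--                 if (id_type == "PI" or (isinstance(id_type, str) and id_type.endswith(".PI"))) and cand:
--                     ipp = cand
--                 elif cand:
--                     ipp = cand
--         elif line.startswith("PV1|"):
--             parts = line.split("|")
--             # PV1-19 = Visit Number (CX)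
--             if len(parts) > 19 and parts[19]:
--                 cx = parts[19].split("^")
--                 dossier = cx[0] if cx else ""
--     return ipp, dossier
-- ===== SOURCE B (Python) =====
-- def _extract_ipp_and_dossier(payload: str) -> tuple[str, str]:
--     """Two reverse scans with early exit: find the last qualifying PID / PV1
--     segment, then extract the field from it."""
--     if not isinstance(payload, str):
--         return "", ""
--     lines = payload.replace("\r\n", "\r").replace("\n", "\r").split("\r")
--
--     def field(line, i):
--         parts = line.split("|")
--         return parts[i] if i < len(parts) else ""
--
--     def pid_val(line):
--         return field(line, 3).split("~")[0].split("^")[0]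
--
--     def pv1_val(line):
--         return field(line, 19).split("^")[0]
--
--     def pid_ok(line):
--         return (line.startswith("PID|") and len(line.split("|")) > 3
--                 and field(line, 3) != "" and pid_val(line) != "")
--
--     def pv1_ok(line):
--         return (line.startswith("PV1|") and len(line.split("|")) > 19
--                 and field(line, 19) != "")
--
--     ipp = ""
--     for line in reversed(lines):
--         if pid_ok(line):
--             ipp = pid_val(line)
--             break
--     dossier = ""
--     for line in reversed(lines):
--         if pv1_ok(line):
--             dossier = pv1_val(line)
--             break
--     return ipp, dossier
-- ===== Notes on version B (the rewrite author's own statement) =====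
-- stated objective: alternative
-- what changed: A's single forward fold that overwrites (ipp, dossier) on every qualifying segment is replaced by two independent reverse scans that stop at the last qualifying PID / PV1 segment and extract the field from just that line.
import Mathlib
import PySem

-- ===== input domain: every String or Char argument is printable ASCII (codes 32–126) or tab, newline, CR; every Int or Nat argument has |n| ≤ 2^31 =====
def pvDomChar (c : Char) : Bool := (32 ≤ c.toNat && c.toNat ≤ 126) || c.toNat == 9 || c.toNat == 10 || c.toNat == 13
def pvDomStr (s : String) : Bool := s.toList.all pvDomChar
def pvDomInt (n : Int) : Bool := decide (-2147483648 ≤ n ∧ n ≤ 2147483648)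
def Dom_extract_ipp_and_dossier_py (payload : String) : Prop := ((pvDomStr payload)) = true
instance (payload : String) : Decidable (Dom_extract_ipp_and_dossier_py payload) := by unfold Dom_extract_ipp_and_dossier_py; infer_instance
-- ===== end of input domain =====

-- B replaces A's single forward fold (overwrite-on-qualify) by two reverse scans
-- that stop at the last qualifying PID / PV1 segment; objective: alternative decomposition.

-- s.split(sep) for a non-empty sep (both Pythons only split on "|", "~", "^", "\r"):
-- exact because PySem.Str.split? is none only for sep = "".
def pvSplit (s sep : String) : List String := (PySem.Str.split? s sep).getD []

-- ===== PORT A =====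
-- one iteration of A's loop body, acting on the (ipp, dossier) state
def pvStepA (st : String × String) (line : String) : String × String :=
  if line = "" then st
  else if PySem.Str.startswith line "PID|" then
    let parts := pvSplit line "|"
    if parts.length > 3 ∧ PySem.List.pyGetD parts 3 "" ≠ "" then
      let repFirst := PySem.List.pyGetD (pvSplit (PySem.List.pyGetD parts 3 "") "~") 0 ""
      let cx := pvSplit repFirst "^"
      let cand := if cx ≠ [] then PySem.List.pyGetD cx 0 "" else ""
      let idType := if cx.length > 4 then PySem.List.pyGetD cx 4 "" else ""
      if (idType = "PI" ∨ PySem.Str.endswith idType ".PI" = true) ∧ cand ≠ "" then (cand, st.2)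
      else if cand ≠ "" then (cand, st.2)
      else st
    else st
  else if PySem.Str.startswith line "PV1|" then
    let parts := pvSplit line "|"
    if parts.length > 19 ∧ PySem.List.pyGetD parts 19 "" ≠ "" then
      let cx := pvSplit (PySem.List.pyGetD parts 19 "") "^"
      (st.1, if cx ≠ [] then PySem.List.pyGetD cx 0 "" else "")
    else st
  else st

def extract_ipp_and_dossier_py (payload : String) : String × String :=
  let lines := pvSplit
    (PySem.Str.replace (PySem.Str.replace payload "\r\n" "\r") "\n" "\r") "\r"
  lines.foldl pvStepA ("", "")

-- ===== PORT B =====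
-- field i of the '|'-split line ("" when out of range)
def pvField (line : String) (i : Nat) : String :=
  PySem.List.pyGetD (pvSplit line "|") i ""

def pvPidVal (line : String) : String :=
  PySem.List.pyGetD
    (pvSplit (PySem.List.pyGetD (pvSplit (pvField line 3) "~") 0 "") "^") 0 ""

def pvPv1Val (line : String) : String :=
  PySem.List.pyGetD (pvSplit (pvField line 19) "^") 0 ""

def pvPidOk (line : String) : Bool :=
  PySem.Str.startswith line "PID|" && decide ((pvSplit line "|").length > 3)
    && decide (pvField line 3 ≠ "") && decide (pvPidVal line ≠ "")

def pvPv1Ok (line : String) : Bool :=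
  PySem.Str.startswith line "PV1|" && decide ((pvSplit line "|").length > 19)
    && decide (pvField line 19 ≠ "")

def extract_ipp_and_dossier_py_alt (payload : String) : String × String :=
  let lines := pvSplit
    (PySem.Str.replace (PySem.Str.replace payload "\r\n" "\r") "\n" "\r") "\r"
  let ipp := match lines.reverse.find? pvPidOk with
    | some l => pvPidVal l
    | none => ""
  let dossier := match lines.reverse.find? pvPv1Ok with
    | some l => pvPv1Val l
    | none => ""
  (ipp, dossier)

-- ===== PRECONDITION & SPEC =====
def Spec_extract_ipp_and_dossier_py (payload : String) (out : String × String) : Prop := out = extract_ipp_and_dossier_py_alt payload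
instance (payload : String) (out : String × String) : Decidable (Spec_extract_ipp_and_dossier_py payload out) := by unfold Spec_extract_ipp_and_dossier_py; infer_instance

-- ===== CLAIM (what is proved, stated in full; the proofs are below) =====
def Claim_equal_extract_ipp_and_dossier_py : Prop := ∀ (payload : String), Dom_extract_ipp_and_dossier_py payload → Spec_extract_ipp_and_dossier_py payload (extract_ipp_and_dossier_py payload)

-- ===== LEMMAS AND PROOFS =====

-- a line cannot start with both "PID|" and "PV1|"
theorem pv_not_both (l : String) (h : PySem.Str.startswith l "PID|" = true) :
    PySem.Str.startswith l "PV1|" = false := by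
  by_contra hc
  have h2 : PySem.Str.startswith l "PV1|" = true := by
    cases hx : PySem.Str.startswith l "PV1|" <;> simp_all
  rw [PySem.Str.startswith_eq, PySem.Chars.startswith_iff] at h h2
  have hle : ("PID|".toList).length ≤ ("PV1|".toList).length := by decide
  have := List.prefix_of_prefix_length_le h h2 hle
  revert this; decide

-- A's guarded first-component read equals the unguarded one
theorem pv_head_if (cx : List String) :
    (if cx ≠ [] then PySem.List.pyGetD cx 0 "" else "") = PySem.List.pyGetD cx 0 "" := by
  by_cases h : cx = [] <;> simp [h, PySem.List.pyGetD, PySem.List.pyGet?]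

-- one step of A's loop, characterised by B's predicates
theorem pvStepA_char (st : String × String) (l : String) :
    pvStepA st l = (if pvPidOk l then pvPidVal l else st.1,
                    if pvPv1Ok l then pvPv1Val l else st.2) := by
  by_cases h0 : l = ""
  · subst h0
    have h1 : pvPidOk "" = false := by decide
    have h2 : pvPv1Ok "" = false := by decide
    simp [pvStepA, h1, h2]
  by_cases hpid : PySem.Str.startswith l "PID|" = true
  · -- PID line: PV1 branch impossible
    have hpv : pvPv1Ok l = false := by
      simp only [pvPv1Ok, pv_not_both l hpid, Bool.false_and]
    have hpv' : ¬ (pvPv1Ok l = true) := by rw [hpv]; exact Bool.false_ne_true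
    rw [if_neg hpv']
    simp only [pvStepA, if_neg h0, hpid, if_true, pv_not_both l hpid, Bool.false_eq_true,
      if_false, pv_head_if]
    by_cases hg : (pvSplit l "|").length > 3 ∧ PySem.List.pyGetD (pvSplit l "|") 3 "" ≠ ""
    · rw [if_pos hg]
      by_cases hc : PySem.List.pyGetD
          (pvSplit (PySem.List.pyGetD (pvSplit (PySem.List.pyGetD (pvSplit l "|") 3 "") "~") 0 "") "^") 0 "" = ""
      · have hv0 : pvPidVal l = "" := hc
        have hok : ¬ (pvPidOk l = true) := by
          simp only [pvPidOk, Bool.and_eq_true, decide_eq_true_eq]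
          intro h; exact h.2 hv0
        rw [if_neg hok, if_neg (fun h => h.2 hc), if_neg (fun h => h hc)]
      · have hvne : pvPidVal l ≠ "" := hc
        have hok : pvPidOk l = true := by
          simp only [pvPidOk, Bool.and_eq_true, decide_eq_true_eq]
          exact ⟨⟨⟨hpid, hg.1⟩, hg.2⟩, hvne⟩
        rw [if_pos hok]
        split_ifs <;> rfl
    · rw [if_neg hg]
      have hok : ¬ (pvPidOk l = true) := by
        simp only [pvPidOk, Bool.and_eq_true, decide_eq_true_eq]
        intro h; exact hg ⟨h.1.1.2, h.1.2⟩
      rw [if_neg hok]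
  · have hpid0 : PySem.Str.startswith l "PID|" = false := by
      cases hx : PySem.Str.startswith l "PID|" <;> simp_all
    have hok : ¬ (pvPidOk l = true) := by
      simp only [pvPidOk, hpid0, Bool.false_and, Bool.false_eq_true]
      exact fun h => h
    rw [if_neg hok]
    by_cases hpv : PySem.Str.startswith l "PV1|" = true
    · simp only [pvStepA, if_neg h0, hpid0, Bool.false_eq_true, if_false, hpv, if_true,
        pv_head_if]
      by_cases hg : (pvSplit l "|").length > 19 ∧ PySem.List.pyGetD (pvSplit l "|") 19 "" ≠ ""
      · rw [if_pos hg]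
        have hok2 : pvPv1Ok l = true := by
          simp only [pvPv1Ok, Bool.and_eq_true, decide_eq_true_eq]
          exact ⟨⟨hpv, hg.1⟩, hg.2⟩
        rw [if_pos hok2]
        rfl
      · rw [if_neg hg]
        have hok2 : ¬ (pvPv1Ok l = true) := by
          simp only [pvPv1Ok, Bool.and_eq_true, decide_eq_true_eq]
          intro h; exact hg ⟨h.1.2, h.2⟩
        rw [if_neg hok2]
    · have hpv0 : PySem.Str.startswith l "PV1|" = false := by
        cases hx : PySem.Str.startswith l "PV1|" <;> simp_all
      have hok2 : ¬ (pvPv1Ok l = true) := by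
        simp only [pvPv1Ok, hpv0, Bool.false_and, Bool.false_eq_true]
        exact fun h => h
      rw [if_neg hok2]
      simp only [pvStepA, if_neg h0, hpid0, hpv0, Bool.false_eq_true, if_false]

-- the whole fold equals the two reverse searches
theorem pv_fold_char (ls : List String) :
    ls.foldl pvStepA ("", "") =
      ((match ls.reverse.find? pvPidOk with | some l => pvPidVal l | none => ""),
       (match ls.reverse.find? pvPv1Ok with | some l => pvPv1Val l | none => "")) := by
  induction ls using List.reverseRecOn with
  | nil => simp
  | append_singleton ls l ih =>
    rw [List.foldl_append, List.foldl_cons, List.foldl_nil, ih, pvStepA_char]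
    simp only [List.reverse_append, List.reverse_singleton, List.singleton_append,
      List.find?_cons]
    cases hp : pvPidOk l <;> cases hv : pvPv1Ok l <;> simp

-- ===== VERDICT (by name: the statement is the Claim_ definition above) =====
theorem extract_ipp_and_dossier_py_spec : Claim_equal_extract_ipp_and_dossier_py := by
  intro payload _
  unfold Spec_extract_ipp_and_dossier_py extract_ipp_and_dossier_py extract_ipp_and_dossier_py_alt
  exact pv_fold_char _
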